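-- pv_equiv track=rewrite | github.com/jamerrq/Competitive-Programming | RPCs/RPC 09/Spell_Checker.py | ommited
-- ===== SOURCE A (Python) =====
-- def ommited(wdic, wchk):
--
--     count = 0
--     i, j = 0, 0
--     while i < len(wdic) and j < len(wchk):
--         if count > 1:
--             return False
--         if wdic[i] == wchk[j]:
--             i += 1
--             j += 1
--         else:
--             count += 1
--             i += 1
--
--     return count <= 1
-- ===== SOURCE B (Python) =====
-- def ommited(wdic, wchk):
--     n, m = len(wdic), len(wchk)
--     p = 0
--     while p < min(n, m) and wdic[p] == wchk[p]:
--         p += 1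
--     if p == min(n, m):
--         return True
--     L = min(n - p - 1, m - p)
--     return wdic[p+1:p+1+L] == wchk[p:p+L]
-- ===== Notes on version B (the rewrite author's own statement) =====
-- stated objective: alternative
-- what changed: Replaces the greedy two-pointer counting loop by a common-prefix scan followed by a single clipped slice comparison after skipping one dictionary character.
import Mathlib
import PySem

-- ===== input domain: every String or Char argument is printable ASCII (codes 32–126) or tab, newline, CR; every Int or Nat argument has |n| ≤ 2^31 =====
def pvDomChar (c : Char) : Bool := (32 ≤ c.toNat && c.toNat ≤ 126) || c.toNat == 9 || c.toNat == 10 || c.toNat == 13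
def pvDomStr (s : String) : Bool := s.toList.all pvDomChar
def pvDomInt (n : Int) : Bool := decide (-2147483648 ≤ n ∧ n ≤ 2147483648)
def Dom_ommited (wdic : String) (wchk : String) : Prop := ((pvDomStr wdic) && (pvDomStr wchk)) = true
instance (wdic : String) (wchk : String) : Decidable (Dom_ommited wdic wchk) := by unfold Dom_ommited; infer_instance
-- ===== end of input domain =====

-- B replaces A's greedy two-pointer mismatch-counting loop by a common-prefix scan
-- plus one clipped aligned suffix comparison (objective: alternative decomposition, same cost).

-- ===== PORT A =====
-- A's while loop; indices i, j and count are the loop state; the loop condition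
-- guarantees the indexing wdic[i], wchk[j] is in range, so getElem? is exact here.
def ommitedLoop (d e : List Char) (i j count : Nat) : Bool :=
  if i < d.length ∧ j < e.length then
    if count > 1 then false
    else if d[i]? = e[j]? then ommitedLoop d e (i+1) (j+1) count
    else ommitedLoop d e (i+1) j (count+1)
  else decide (count ≤ 1)
termination_by d.length - i
decreasing_by all_goals omega

def ommited (wdic : String) (wchk : String) : Bool :=
  ommitedLoop wdic.toList wchk.toList 0 0 0

-- ===== PORT B =====
-- Source B's prefix-scan while loop; the loop condition keeps k in range of both lists.
def prefScan (d e : List Char) (k : Nat) : Nat :=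
  if k < min d.length e.length ∧ d[k]? = e[k]? then prefScan d e (k+1) else k
termination_by min d.length e.length - k
decreasing_by omega

-- Source B's slices wdic[p+1:p+1+L] and wchk[p:p+L] have nonnegative in-order bounds,
-- so drop/take is exact for them.
def ommited_alt (wdic : String) (wchk : String) : Bool :=
  let d := wdic.toList
  let e := wchk.toList
  let p := prefScan d e 0
  if p = min d.length e.length then true
  else
    let L := min (d.length - p - 1) (e.length - p)
    decide ((d.drop (p+1)).take L = (e.drop p).take L)

-- ===== PRECONDITION & SPEC =====
def Spec_ommited (wdic : String) (wchk : String) (out : Bool) : Prop := out = ommited_alt wdic wchk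
instance (wdic : String) (wchk : String) (out : Bool) : Decidable (Spec_ommited wdic wchk out) := by unfold Spec_ommited; infer_instance

-- ===== CLAIM (what is proved, stated in full; the proofs are below) =====
def Claim_equal_ommited : Prop := ∀ (wdic : String) (wchk : String), Dom_ommited wdic wchk → Spec_ommited wdic wchk (ommited wdic wchk)

-- ===== LEMMAS AND PROOFS =====

-- A's loop after the single skip (count = 1, i = j + 1) is exactly the clipped
-- aligned suffix comparison B performs.
lemma loop_count_one (d e : List Char) (j : Nat) :
    ommitedLoop d e (j+1) j 1 =
      decide ((d.drop (j+1)).take (min (d.length - j - 1) (e.length - j)) =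
              (e.drop j).take (min (d.length - j - 1) (e.length - j))) := by
  by_cases h : j + 1 < d.length ∧ j < e.length
  · obtain ⟨hd, hc⟩ := h
    rw [ommitedLoop]
    simp only [if_pos (And.intro hd hc)]
    have hL : min (d.length - j - 1) (e.length - j) =
        min (d.length - (j+1) - 1) (e.length - (j+1)) + 1 := by omega
    have hdrop_d : d.drop (j+1) = d[j+1] :: d.drop (j+2) := List.drop_eq_getElem_cons hd
    have hdrop_c : e.drop j = e[j] :: e.drop (j+1) := List.drop_eq_getElem_cons hc
    by_cases heq : d[j+1]? = e[j]?
    · have heq' : d[j+1] = e[j] := by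
        have := heq
        rw [List.getElem?_eq_getElem hd, List.getElem?_eq_getElem hc] at this
        exact Option.some.inj this
      rw [if_neg (by omega : ¬ (1:Nat) > 1), if_pos heq, loop_count_one d e (j+1)]
      rw [hL, hdrop_d, hdrop_c, List.take_succ_cons, List.take_succ_cons, heq']
      simp
    · rw [if_neg (by omega : ¬ (1:Nat) > 1), if_neg heq]
      -- count becomes 2: the loop returns false at once
      have hfalse : ommitedLoop d e (j+2) j 2 = false := by
        rw [ommitedLoop]
        by_cases h2 : j + 2 < d.length ∧ j < e.length
        · simp [h2]
        · simp [h2]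
      rw [hfalse]
      -- RHS is false: the first compared characters differ
      have hne : d[j+1] ≠ e[j] := by
        intro hcontra
        apply heq
        rw [List.getElem?_eq_getElem hd, List.getElem?_eq_getElem hc, hcontra]
      rw [hL, hdrop_d, hdrop_c, List.take_succ_cons, List.take_succ_cons]
      simp [hne]
  · rw [ommitedLoop, if_neg h]
    have hL0 : min (d.length - j - 1) (e.length - j) = 0 := by omega
    rw [hL0]
    simp
termination_by d.length - j
decreasing_by omega

-- A's loop in its count = 0 phase (i = j) agrees with B's prefix scan followed by
-- the clipped suffix comparison.
lemma loop_eq_alt (d e : List Char) (i : Nat) (hi : i ≤ min d.length e.length) :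
    ommitedLoop d e i i 0 =
      (if prefScan d e i = min d.length e.length then true
       else
        decide ((d.drop (prefScan d e i + 1)).take
            (min (d.length - prefScan d e i - 1) (e.length - prefScan d e i)) =
          (e.drop (prefScan d e i)).take
            (min (d.length - prefScan d e i - 1) (e.length - prefScan d e i)))) := by
  by_cases hlt : i < min d.length e.length
  · by_cases heq : d[i]? = e[i]?
    · have hp : prefScan d e i = prefScan d e (i+1) := by
        rw [prefScan]; exact if_pos ⟨hlt, heq⟩
      rw [ommitedLoop, if_pos (by omega : i < d.length ∧ i < e.length),
          if_neg (by omega : ¬ (0:Nat) > 1), if_pos heq, hp]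
      exact loop_eq_alt d e (i+1) (by omega)
    · have hp : prefScan d e i = i := by
        rw [prefScan]; exact if_neg (fun h => heq h.2)
      rw [ommitedLoop, if_pos (by omega : i < d.length ∧ i < e.length),
          if_neg (by omega : ¬ (0:Nat) > 1), if_neg heq, hp,
          if_neg (by omega : ¬ i = min d.length e.length)]
      exact loop_count_one d e i
  · have hieq : i = min d.length e.length := by omega
    have hp : prefScan d e i = i := by
      rw [prefScan]; exact if_neg (fun h => absurd h.1 (by omega))
    rw [ommitedLoop, if_neg (by omega : ¬ (i < d.length ∧ i < e.length)), hp,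
        if_pos hieq]
    simp
termination_by min d.length e.length - i
decreasing_by omega

-- ===== VERDICT (by name: the statement is the Claim_ definition above) =====
theorem ommited_spec : Claim_equal_ommited := by
  intro wdic wchk _
  unfold Spec_ommited ommited ommited_alt
  exact loop_eq_alt wdic.toList wchk.toList 0 (Nat.zero_le _)
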